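-- pv_equiv track=rewrite | github.com/cal-itp/graas | server/app-engine/graas_bot.py | to_display_name
-- ===== SOURCE A (Python) =====
-- def to_display_name(s):
--     r = ''
--     last_c = '-'
--
--     for c in s:
--         if c == '-':
--             r += ' '
--         elif c.islower() and last_c == '-':
--             r += c.upper()
--         else:
--             r += c
--
--         last_c = c
--
--     return r
-- ===== SOURCE B (Python) =====
-- def to_display_name(s):
--     return ' '.join(w[:1].upper() + w[1:] for w in s.split('-'))
-- ===== Notes on version B (the rewrite author's own statement) =====
-- stated objective: idiomatic
-- what changed: Replaced the stateful character-by-character loop (tracking the previous character) with splitting on the dash separator, uppercasing the first character of each segment, and joining the segments with spaces.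
import Mathlib
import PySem

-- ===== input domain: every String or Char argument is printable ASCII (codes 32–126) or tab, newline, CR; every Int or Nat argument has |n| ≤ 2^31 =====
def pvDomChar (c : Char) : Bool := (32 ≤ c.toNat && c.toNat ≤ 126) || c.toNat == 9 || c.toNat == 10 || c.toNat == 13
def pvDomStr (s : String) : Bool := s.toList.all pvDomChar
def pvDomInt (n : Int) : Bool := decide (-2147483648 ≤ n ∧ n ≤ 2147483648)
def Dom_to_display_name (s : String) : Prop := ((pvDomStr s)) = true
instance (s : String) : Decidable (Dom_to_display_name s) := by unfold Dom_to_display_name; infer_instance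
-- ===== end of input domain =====

-- B replaces A's stateful char-by-char loop (tracking the previous character) by
-- split-on-'-' / capitalize-first-char-of-each-segment / join-with-space (objective: idiomatic).

-- ===== PORT A =====
-- literal port of A: fold over the characters with state (r, last_c), starting last_c = '-'
def to_display_name (s : String) : String :=
  String.ofList
    (s.toList.foldl
      (fun (p : List Char × Char) c =>
        (p.1 ++ (if c = '-' then [' ']
                 else if PySem.Chars.islower c && p.2 == '-' then PySem.Chars.upper [c]
                 else [c]),
         c))
      ([], '-')).1

-- ===== PORT B =====
-- literal port of B: ' '.join(w[:1].upper() + w[1:] for w in s.split('-'))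
-- (s.split('-') with a one-char separator is List.splitOn '-'; w[:1]/w[1:] are take 1/drop 1)
def to_display_name_alt (s : String) : String :=
  String.ofList (PySem.Chars.join [' ']
    ((s.toList.splitOn '-').map (fun w => PySem.Chars.upper (w.take 1) ++ w.drop 1)))

-- ===== PRECONDITION & SPEC =====
def Spec_to_display_name (s : String) (out : String) : Prop := out = to_display_name_alt s
instance (s : String) (out : String) : Decidable (Spec_to_display_name s out) := by unfold Spec_to_display_name; infer_instance

-- ===== CLAIM (what is proved, stated in full; the proofs are below) =====
def Claim_equal_to_display_name : Prop := ∀ (s : String), Dom_to_display_name s → Spec_to_display_name s (to_display_name s)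

-- ===== LEMMAS AND PROOFS =====

-- B's per-segment transform, named for the proofs
def pvCap (w : List Char) : List Char := PySem.Chars.upper (w.take 1) ++ w.drop 1

-- A's loop output as a function of the current 'last_c == "-"' flag
def pvOut (b : Bool) (cs : List Char) : List Char :=
  PySem.Chars.join [' ']
    (if b then (cs.splitOn '-').map pvCap
     else (cs.splitOn '-').headI :: ((cs.splitOn '-').tail).map pvCap)

theorem pv_splitOn_ne_nil (t : List Char) : List.splitOn '-' t ≠ [] := by
  simp only [List.splitOn]; exact List.splitOnP_ne_nil _ _

theorem pv_splitOn_dash (t : List Char) :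
    List.splitOn '-' ('-' :: t) = [] :: List.splitOn '-' t := by
  simp [List.splitOn, List.splitOnP_cons]

theorem pv_splitOn_cons (c : Char) (t : List Char) (h : ¬ c = '-') :
    List.splitOn '-' (c :: t) = (List.splitOn '-' t).modifyHead (c :: ·) := by
  simp [List.splitOn, List.splitOnP_cons, h]

theorem pvOut_dash (b : Bool) (t : List Char) :
    pvOut b ('-' :: t) = ' ' :: pvOut true t := by
  obtain ⟨h, r, hseg⟩ := List.exists_cons_of_ne_nil (pv_splitOn_ne_nil t)
  simp only [pvOut, pv_splitOn_dash, hseg]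
  cases b <;>
    simp [List.map_cons, PySem.Chars.join_cons_cons, pvCap, PySem.Chars.upper,
      List.headI, List.tail]

theorem pvOut_cons (c : Char) (t : List Char) (hc : ¬ c = '-') (b : Bool) :
    pvOut b (c :: t) =
      (if b && PySem.Chars.islower c then PySem.Chars.upper [c] else [c]) ++ pvOut false t := by
  obtain ⟨h, r, hseg⟩ := List.exists_cons_of_ne_nil (pv_splitOn_ne_nil t)
  simp only [pvOut, pv_splitOn_cons c t hc, hseg, List.modifyHead_cons]
  by_cases hlow : PySem.Chars.islower c = true <;>
    cases b <;>
      cases r <;>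
        simp [PySem.Chars.join_cons_cons, PySem.Chars.join_singleton, pvCap,
          PySem.Chars.upper, PySem.Chars.upperChar, hlow, List.headI, List.tail]

-- the loop invariant: A's fold from (acc, last) yields acc ++ pvOut (last == '-')
theorem pv_loop (cs : List Char) : ∀ (acc : List Char) (last : Char),
    (cs.foldl
      (fun (p : List Char × Char) c =>
        (p.1 ++ (if c = '-' then [' ']
                 else if PySem.Chars.islower c && p.2 == '-' then PySem.Chars.upper [c]
                 else [c]),
         c))
      (acc, last)).1 = acc ++ pvOut (last == '-') cs := by
  induction cs with
  | nil =>
    intro acc last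
    simp [pvOut, pvCap, PySem.Chars.upper, PySem.Chars.join_singleton]
  | cons c t ih =>
    intro acc last
    by_cases hc : c = '-'
    · subst hc
      simp only [List.foldl_cons, ih]
      rw [pvOut_dash]
      simp
    · simp only [List.foldl_cons, if_neg hc, ih]
      rw [pvOut_cons c t hc]
      have hcb : (c == '-') = false := by simp [hc]
      simp [hcb, Bool.and_comm, List.append_assoc]

-- ===== VERDICT (by name: the statement is the Claim_ definition above) =====
theorem to_display_name_spec : Claim_equal_to_display_name := by
  intro s _
  unfold Spec_to_display_name to_display_name to_display_name_alt
  rw [pv_loop]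
  show String.ofList (pvOut true s.toList) = _
  rfl
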